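-- pv_equiv track=rewrite | github.com/Furkanahii/Rheo-MVP | New Era Python/cmpeexam2.py | is_only_vowels
-- ===== SOURCE A (Python) =====
-- def is_only_vowels(s):
--    s = s.lower()
--    for c in s:
--       if c in vowels:
--          continue
--       else:
--          return False
--    return True
--
-- vowels='aeiou'
-- ===== SOURCE B (Python) =====
-- def is_only_vowels(s):
--     t = list(s.lower())
--     total = 0
--     for v in vowels:
--         total += t.count(v)
--     return total == len(t)
--
-- vowels = 'aeiou'
-- ===== Notes on version B (the rewrite author's own statement) =====
-- stated objective: alternative
-- what changed: Instead of scanning the characters once with an early return, B makes one counting pass per vowel (5 passes), sums the five occurrence counts and compares the total with the string length; since the vowels are distinct, the total equals the length exactly when every character is a vowel.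
import Mathlib
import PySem

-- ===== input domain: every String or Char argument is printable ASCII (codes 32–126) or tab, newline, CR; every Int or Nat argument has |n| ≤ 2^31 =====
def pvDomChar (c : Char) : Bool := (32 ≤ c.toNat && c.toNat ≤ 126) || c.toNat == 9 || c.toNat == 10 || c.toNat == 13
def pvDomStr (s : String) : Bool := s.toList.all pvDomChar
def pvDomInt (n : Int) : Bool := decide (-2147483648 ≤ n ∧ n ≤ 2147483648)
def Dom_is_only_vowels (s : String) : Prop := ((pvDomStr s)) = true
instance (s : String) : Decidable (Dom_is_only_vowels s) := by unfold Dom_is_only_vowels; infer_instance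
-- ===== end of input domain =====

-- B replaces A's single early-exit character scan by five per-vowel counting passes whose total is compared with the length (alternative decomposition, same cost). Equivalence proved on all inputs.

-- ===== PORT A =====
def pvVowels : List Char := "aeiou".toList

-- the for-loop of A with its early 'return False'
def pvLoopA : List Char → Bool
  | [] => true
  | c :: rest => if pvVowels.contains c then pvLoopA rest else false

def is_only_vowels (s : String) : Bool :=
  pvLoopA (PySem.Str.lower s).toList

-- ===== PORT B =====
def is_only_vowels_alt (s : String) : Bool :=
  let t := (PySem.Str.lower s).toList
  let total := pvVowels.foldl (fun acc v => acc + PySem.List.count t v) 0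
  total == t.length

-- ===== PRECONDITION & SPEC =====
def Spec_is_only_vowels (s : String) (out : Bool) : Prop := out = is_only_vowels_alt s
instance (s : String) (out : Bool) : Decidable (Spec_is_only_vowels s out) := by unfold Spec_is_only_vowels; infer_instance

-- ===== CLAIM (what is proved, stated in full; the proofs are below) =====
def Claim_equal_is_only_vowels : Prop := ∀ (s : String), Dom_is_only_vowels s → Spec_is_only_vowels s (is_only_vowels s)

-- ===== LEMMAS AND PROOFS =====
lemma pvLoopA_eq_true_iff (cs : List Char) :
    pvLoopA cs = true ↔ ∀ c ∈ cs, c ∈ pvVowels := by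
  induction cs with
  | nil => simp [pvLoopA]
  | cons c rest ih =>
    simp only [pvLoopA]
    by_cases h : pvVowels.contains c <;> simp [h, ih, List.contains_eq_mem] at *

-- the five vowel counts sum to the number of vowel characters (the vowels are pairwise distinct)
lemma pv_sum_counts (t : List Char) :
    t.count 'a' + t.count 'e' + t.count 'i' + t.count 'o' + t.count 'u'
      = t.countP (fun c => decide (c ∈ pvVowels)) := by
  induction t with
  | nil => simp
  | cons c rest ih =>
    simp only [List.count_cons, List.countP_cons]
    by_cases hm : c ∈ pvVowels
    · have h5 : c = 'a' ∨ c = 'e' ∨ c = 'i' ∨ c = 'o' ∨ c = 'u' := by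
        simpa [pvVowels] using hm
      rcases h5 with h | h | h | h | h <;> subst h <;> simp [hm, ih] <;> omega
    · have h5 : ¬ (c = 'a' ∨ c = 'e' ∨ c = 'i' ∨ c = 'o' ∨ c = 'u') := by
        simpa [pvVowels] using hm
      push_neg at h5
      obtain ⟨h1, h2, h3, h4, h5⟩ := h5
      simp [h1, h2, h3, h4, h5, hm, ih]

lemma pv_equal (s : String) : is_only_vowels s = is_only_vowels_alt s := by
  unfold is_only_vowels is_only_vowels_alt
  set t := (PySem.Str.lower s).toList with ht
  have hfold : pvVowels.foldl (fun acc v => acc + PySem.List.count t v) 0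
      = t.countP (fun c => decide (c ∈ pvVowels)) := by
    have hv : pvVowels = ['a', 'e', 'i', 'o', 'u'] := by decide
    rw [← pv_sum_counts, hv]
    simp only [PySem.List.count, List.foldl]
    omega
  have hb : ∀ b c : Bool, (b = true ↔ c = true) → b = c := by decide
  apply hb
  simp only [hfold, beq_iff_eq, pvLoopA_eq_true_iff]
  rw [List.countP_eq_length]
  simp

-- ===== VERDICT (by name: the statement is the Claim_ definition above) =====
theorem is_only_vowels_spec : Claim_equal_is_only_vowels := by
  intro s _
  exact pv_equal s
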